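-- pv_equiv track=rewrite | github.com/blaster151/system-sanity | perfmon_transform_nopandas.py | sniff_header
-- ===== SOURCE A (Python) =====
-- def sniff_header(rows):
--     """
--     rows: list of non-empty CSV rows.
--     Returns (header_row_index) where that row should be used as header.
--     Heuristics:
--       - skip PDH preamble (row containing 'PDH-CSV')
--       - prefer a row whose first cell equals 'Time' (typeperf default)
--       - otherwise pick the first row that contains any counter-looking token '\Process('
--       - fallback to row 0
--     """
--     for i, r in enumerate(rows[:5]):
--         if any("PDH-CSV" in c for c in r):
--             continue
--         if len(r) and r[0].strip().lower() == "time":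
--             return i
--     for i, r in enumerate(rows[:5]):
--         line = ",".join(r)
--         if "\\Process(" in line or line.startswith("\\"):
--             return i
--     return 0
-- ===== SOURCE B (Python) =====
-- def sniff_header(rows):
--     # Score every candidate row once with a priority rank and take the
--     # lexicographic minimum: (0, i) = usable 'Time' header row,
--     # (1, i) = counter-looking row, (2, 0) = neither / fallback to row 0.
--     def rank(i, r):
--         if not any("PDH-CSV" in c for c in r) and r and r[0].strip().lower() == "time":
--             return (0, i)
--         line = ",".join(r)
--         if "\\Process(" in line or line.startswith("\\"):
--             return (1, i)
--         return (2, 0)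
--     return min((rank(i, r) for i, r in enumerate(rows[:5])), default=(2, 0))[1]
-- ===== Notes on version B (the rewrite author's own statement) =====
-- stated objective: alternative
-- what changed: Instead of A's two sequential early-return scans, B scores every row of rows[:5] once with a priority rank ((0,i) usable 'Time' header, (1,i) counter-looking row, (2,0) neither) and returns the index component of the lexicographic minimum rank.
import Mathlib
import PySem

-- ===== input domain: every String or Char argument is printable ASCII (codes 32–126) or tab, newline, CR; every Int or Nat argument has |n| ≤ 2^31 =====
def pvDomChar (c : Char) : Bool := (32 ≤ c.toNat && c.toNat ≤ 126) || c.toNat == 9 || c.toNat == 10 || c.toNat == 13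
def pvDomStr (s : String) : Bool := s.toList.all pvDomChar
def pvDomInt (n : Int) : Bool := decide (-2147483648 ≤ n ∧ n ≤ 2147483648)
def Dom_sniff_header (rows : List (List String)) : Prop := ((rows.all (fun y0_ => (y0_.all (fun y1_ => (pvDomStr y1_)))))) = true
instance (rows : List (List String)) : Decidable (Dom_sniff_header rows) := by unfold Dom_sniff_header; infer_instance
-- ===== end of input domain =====

-- B replaces A's two sequential early-return scans by ranking each row once
-- ((0,i) time header, (1,i) counter row, (2,0) neither) and taking the
-- lexicographic minimum rank; same result, same cost (objective: alternative).

-- ===== PORT A =====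
-- any("PDH-CSV" in c for c in r)
def pvPdhRow (r : List String) : Bool := r.any (fun c => PySem.Str.isIn "PDH-CSV" c)
-- len(r) and r[0].strip().lower() == "time"
def pvTimeHead (r : List String) : Bool :=
  match r with
  | [] => false
  | c :: _ => PySem.Str.lower (PySem.Str.strip c) == "time"
-- ",".join(r); "\\Process(" in line or line.startswith("\\")
def pvProcRow (r : List String) : Bool :=
  let line := PySem.Str.join "," r
  PySem.Str.isIn "\\Process(" line || PySem.Str.startswith line "\\"

-- first loop of A (early return of index)
def pvLoopA1 (i : Nat) : List (List String) → Option Nat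
  | [] => none
  | r :: rest =>
    if pvPdhRow r then pvLoopA1 (i + 1) rest
    else if pvTimeHead r then some i
    else pvLoopA1 (i + 1) rest

-- second loop of A
def pvLoopA2 (i : Nat) : List (List String) → Option Nat
  | [] => none
  | r :: rest =>
    if pvProcRow r then some i
    else pvLoopA2 (i + 1) rest

def sniff_header (rows : List (List String)) : Int :=
  match pvLoopA1 0 (rows.take 5) with
  | some i => (i : Int)
  | none =>
    match pvLoopA2 0 (rows.take 5) with
    | some i => (i : Int)
    | none => 0

-- ===== PORT B =====
-- rank(i, r): priority class and index of a candidate row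
def pvRank (i : Nat) (r : List String) : Nat × Nat :=
  if !pvPdhRow r && pvTimeHead r then (0, i)
  else if pvProcRow r then (1, i)
  else (2, 0)

-- Python min on pairs (lexicographic; keeps the first argument on ties)
def pvMinPair (a b : Nat × Nat) : Nat × Nat :=
  if a.1 < b.1 ∨ (a.1 = b.1 ∧ a.2 ≤ b.2) then a else b

-- min((rank(i,r) for i,r in enumerate(…)), default=(2,0)) as a fold of the binary min
def pvBestRank (i : Nat) (acc : Nat × Nat) : List (List String) → Nat × Nat
  | [] => acc
  | r :: rest => pvBestRank (i + 1) (pvMinPair acc (pvRank i r)) rest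

def sniff_header_alt (rows : List (List String)) : Int :=
  ((pvBestRank 0 (2, 0) (rows.take 5)).2 : Int)

-- ===== PRECONDITION & SPEC =====
def Spec_sniff_header (rows : List (List String)) (out : Int) : Prop := out = sniff_header_alt rows
instance (rows : List (List String)) (out : Int) : Decidable (Spec_sniff_header rows out) := by unfold Spec_sniff_header; infer_instance

-- ===== CLAIM (what is proved, stated in full; the proofs are below) =====
def Claim_equal_sniff_header : Prop := ∀ (rows : List (List String)), Dom_sniff_header rows → Spec_sniff_header rows (sniff_header rows)

-- ===== LEMMAS AND PROOFS =====

-- the combined result of A's two scans, expressed as a rank pair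
def pvR (i : Nat) (l : List (List String)) : Nat × Nat :=
  match pvLoopA1 i l with
  | some t => (0, t)
  | none =>
    match pvLoopA2 i l with
    | some p => (1, p)
    | none => (2, 0)

theorem pvMinPair_assoc (a b c : Nat × Nat) :
    pvMinPair (pvMinPair a b) c = pvMinPair a (pvMinPair b c) := by
  rcases a with ⟨a1, a2⟩; rcases b with ⟨b1, b2⟩; rcases c with ⟨c1, c2⟩
  simp only [pvMinPair]
  split_ifs <;> first | rfl | omega

theorem pvLoopA1_ge (l : List (List String)) : ∀ i t, pvLoopA1 i l = some t → i ≤ t := by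
  induction l with
  | nil => intro i t h; simp [pvLoopA1] at h
  | cons r rest ih =>
    intro i t h
    simp only [pvLoopA1] at h
    split_ifs at h with h1 h2
    · exact Nat.le_of_succ_le (ih (i + 1) t h)
    · cases h; omega
    · exact Nat.le_of_succ_le (ih (i + 1) t h)

theorem pvLoopA2_ge (l : List (List String)) : ∀ i t, pvLoopA2 i l = some t → i ≤ t := by
  induction l with
  | nil => intro i t h; simp [pvLoopA2] at h
  | cons r rest ih =>
    intro i t h
    simp only [pvLoopA2] at h
    split_ifs at h with h1
    · cases h; omega
    · exact Nat.le_of_succ_le (ih (i + 1) t h)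

-- merging one row's rank with the combined result of the rest
theorem pvR_cons (i : Nat) (r : List String) (rest : List (List String)) :
    pvMinPair (pvRank i r) (pvR (i + 1) rest) = pvR i (r :: rest) := by
  simp only [pvR, pvRank, pvLoopA1, pvLoopA2]
  by_cases h1 : pvPdhRow r = true <;> by_cases h2 : pvTimeHead r = true <;>
    by_cases h3 : pvProcRow r = true <;>
    simp only [h1, h2, h3, Bool.not_true, Bool.not_false, Bool.false_and, Bool.true_and,
      Bool.false_eq_true, if_true, if_false] <;>
  · rcases hA : pvLoopA1 (i + 1) rest with _ | t <;>
      rcases hB : pvLoopA2 (i + 1) rest with _ | p <;>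
      simp only [pvMinPair, lt_self_iff_false, true_and, false_and, or_false, false_or] <;>
      split_ifs <;> first
        | rfl
        | (exfalso; first
            | omega
            | (simp only [false_and, true_and, or_false, false_or] at *; omega)
            | (have := pvLoopA1_ge rest (i + 1) t hA; omega)
            | (have := pvLoopA2_ge rest (i + 1) p hB; omega))

-- loop invariant for B's fold: acc stays ≤ (2,0), and the fold computes min(acc, pvR)
theorem pvBestRank_eq (l : List (List String)) :
    ∀ i acc, (acc.1 < 2 ∨ (acc.1 = 2 ∧ acc.2 = 0)) →
      pvBestRank i acc l = pvMinPair acc (pvR i l) := by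
  induction l with
  | nil =>
    intro i acc hacc
    simp only [pvBestRank, pvR, pvLoopA1, pvLoopA2, pvMinPair]
    rcases acc with ⟨a1, a2⟩
    split_ifs <;> first | rfl | omega
  | cons r rest ih =>
    intro i acc hacc
    have hrank : (pvRank i r).1 < 2 ∨ ((pvRank i r).1 = 2 ∧ (pvRank i r).2 = 0) := by
      simp only [pvRank]; split_ifs <;> simp
    have hacc' : (pvMinPair acc (pvRank i r)).1 < 2 ∨
        ((pvMinPair acc (pvRank i r)).1 = 2 ∧ (pvMinPair acc (pvRank i r)).2 = 0) := by
      simp only [pvMinPair]; split_ifs <;> assumption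
    calc pvBestRank i acc (r :: rest)
        = pvBestRank (i + 1) (pvMinPair acc (pvRank i r)) rest := rfl
      _ = pvMinPair (pvMinPair acc (pvRank i r)) (pvR (i + 1) rest) := ih _ _ hacc'
      _ = pvMinPair acc (pvMinPair (pvRank i r) (pvR (i + 1) rest)) := pvMinPair_assoc ..
      _ = pvMinPair acc (pvR i (r :: rest)) := by rw [pvR_cons]

-- ===== VERDICT (by name: the statement is the Claim_ definition above) =====
theorem sniff_header_spec : Claim_equal_sniff_header := by
  intro rows _
  unfold Spec_sniff_header sniff_header sniff_header_alt
  rw [pvBestRank_eq _ _ _ (Or.inr ⟨rfl, rfl⟩)]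
  have h20 : pvMinPair (2, 0) (pvR 0 (rows.take 5)) = pvR 0 (rows.take 5) := by
    simp only [pvR]
    rcases pvLoopA1 0 (rows.take 5) with _ | t <;>
      rcases pvLoopA2 0 (rows.take 5) with _ | p <;>
      simp only [pvMinPair, lt_self_iff_false, true_and, false_and, or_false, false_or] <;>
      split_ifs <;> first
        | rfl
        | (exfalso; first
            | omega
            | (simp only [false_and, true_and, or_false, false_or] at *; omega))
  rw [h20]
  simp only [pvR]
  rcases pvLoopA1 0 (rows.take 5) with _ | t <;>
    rcases pvLoopA2 0 (rows.take 5) with _ | p <;> rfl
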